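-- pv_equiv track=rewrite | github.com/fraserlove/algo-lab | schoolwork/advanced-higher/SDD/02_2d_array_rainfall.py | weeklyStats
-- ===== SOURCE A (Python) =====
-- def weeklyStats(array):
--     for x in range(len(array)):
--         total = 0
--         least, most = array[x][0], array[x][0]
--         for y in range(len(array[x])):
--             total += array[x][y]
--             if array[x][y] < least:
--                 least = array[x][y]
--             if array[x][y] > most:
--                 most = array[x][y]
--         yield least, most, total
-- ===== SOURCE B (Python) =====
-- def weeklyStats(array):
--     for row in array:
--         s = sorted(row)
--         yield s[0], s[-1], sum(s)
-- ===== Notes on version B (the rewrite author's own statement) =====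
-- stated objective: alternative
-- what changed: Replaces A's single fused running min/max/total scan per row with sort-then-pick: each row is sorted, the min and max are read off as the first and last elements of the sorted copy, and the total is summed over it.
import Mathlib
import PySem

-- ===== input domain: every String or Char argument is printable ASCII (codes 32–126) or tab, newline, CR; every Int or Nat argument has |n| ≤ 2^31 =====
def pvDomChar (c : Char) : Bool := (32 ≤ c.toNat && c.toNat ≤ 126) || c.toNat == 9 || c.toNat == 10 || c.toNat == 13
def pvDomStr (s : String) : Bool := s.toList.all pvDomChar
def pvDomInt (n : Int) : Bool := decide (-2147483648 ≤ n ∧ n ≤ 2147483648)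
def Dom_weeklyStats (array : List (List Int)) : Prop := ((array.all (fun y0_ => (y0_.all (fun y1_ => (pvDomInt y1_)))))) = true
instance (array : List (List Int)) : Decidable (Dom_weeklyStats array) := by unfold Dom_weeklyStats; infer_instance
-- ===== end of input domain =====

-- B replaces A's fused running min/max/total scan per row by sort-then-pick:
-- sort the row, read min/max off the ends of the sorted copy, sum over it.

-- ===== PORT A =====
-- body of A's outer loop: the fused accumulation over one row (index-based, like A)
def pvRowA (row : List Int) : Int × Int × Int :=
  let first := PySem.List.pyGetD row 0 0
  (PySem.List.pyRange 0 row.length 1).foldl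
    (fun (s : Int × Int × Int) y =>
      ((if PySem.List.pyGetD row y 0 < s.1 then PySem.List.pyGetD row y 0 else s.1),
       (if PySem.List.pyGetD row y 0 > s.2.1 then PySem.List.pyGetD row y 0 else s.2.1),
       s.2.2 + PySem.List.pyGetD row y 0))
    (first, first, 0)

def weeklyStats (array : List (List Int)) : List (Int × Int × Int) :=
  (PySem.List.pyRange 0 array.length 1).foldl
    (fun acc x => acc ++ [pvRowA (PySem.List.pyGetD array x [])]) []

-- ===== PORT B =====
def weeklyStats_alt (array : List (List Int)) : List (Int × Int × Int) :=
  array.map (fun row =>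
    let s := PySem.List.sorted row (fun x => x) false
    ((PySem.List.pyGet? s 0).getD 0,
     (PySem.List.pyGet? s (-1)).getD 0,
     s.sum))

-- ===== PRECONDITION & SPEC =====
-- Pre_ excludes arrays containing an empty row: there A raises IndexError
-- (array[x][0]) and B raises IndexError too (sorted(row)[0]); neither returns.
def Pre_weeklyStats (array : List (List Int)) : Prop := ∀ row ∈ array, row ≠ []
instance (array : List (List Int)) : Decidable (Pre_weeklyStats array) := by
  unfold Pre_weeklyStats; infer_instance
def pvWitness_weeklyStats : List (List Int) := [[1, 2, 3], [5, -1, 0]]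

def Spec_weeklyStats (array : List (List Int)) (out : List (Int × Int × Int)) : Prop := out = weeklyStats_alt array
instance (array : List (List Int)) (out : List (Int × Int × Int)) : Decidable (Spec_weeklyStats array out) := by unfold Spec_weeklyStats; infer_instance

-- ===== CLAIM (what is proved, stated in full; the proofs are below) =====
def Claim_equal_weeklyStats : Prop := ∀ (array : List (List Int)), Dom_weeklyStats array → Pre_weeklyStats array → Spec_weeklyStats array (weeklyStats array)

-- ===== LEMMAS AND PROOFS =====

theorem pv_foldl_append_map {α β : Type} (g : α → β) :
    ∀ (l : List α) (acc : List β),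
      l.foldl (fun acc r => acc ++ [g r]) acc = acc ++ l.map g := by
  intro l
  induction l with
  | nil => simp
  | cons h t ih => intro acc; simp [List.foldl, ih]

theorem pv_foldl_triple :
    ∀ (l : List Int) (a b c : Int),
      l.foldl (fun (s : Int × Int × Int) v =>
          ((if v < s.1 then v else s.1), (if v > s.2.1 then v else s.2.1), s.2.2 + v))
        (a, b, c)
      = (l.foldl min a, l.foldl max b, c + l.sum) := by
  intro l
  induction l with
  | nil => simp
  | cons h t ih =>
      intro a b c
      simp only [List.foldl, List.sum_cons, ih]
      have h1 : (if h < a then h else a) = min a h := by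
        simp [min_def]; split_ifs <;> omega
      have h2 : (if h > b then h else b) = max b h := by
        simp [max_def]; split_ifs <;> omega
      rw [h1, h2]
      ring_nf

-- every element of an ascending-sorted list is below its last element
theorem pv_le_getLast (row : List Int) (y : Int)
    (hy : y ∈ PySem.List.sorted row (fun x => x) false)
    (h : PySem.List.sorted row (fun x => x) false ≠ []) :
    y ≤ (PySem.List.sorted row (fun x => x) false).getLast h := by
  obtain ⟨i, hi, rfl⟩ := List.mem_iff_getElem.mp hy
  rw [List.getLast_eq_getElem]
  exact PySem.List.sorted_id_getElem_mono row (p := i)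
    (q := (PySem.List.sorted row (fun x => x) false).length - 1) (by omega) (by omega)

theorem pv_row_eq (h : Int) (t : List Int) :
    pvRowA (h :: t)
      = (((PySem.List.pyGet? (PySem.List.sorted (h :: t) (fun x => x) false) 0).getD 0),
         ((PySem.List.pyGet? (PySem.List.sorted (h :: t) (fun x => x) false) (-1)).getD 0),
         (PySem.List.sorted (h :: t) (fun x => x) false).sum) := by
  set s := PySem.List.sorted (h :: t) (fun x => x) false with hs
  have hsne : s ≠ [] := by
    rw [hs]; simp [PySem.List.sorted_eq_nil_iff]
  obtain ⟨m, rest, hcons⟩ := List.exists_cons_of_ne_nil hsne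
  -- A side
  unfold pvRowA
  rw [PySem.List.foldl_pyRange_zero_pyGetD' (h :: t) 0
        (fun (st : Int × Int × Int) v =>
          ((if v < st.1 then v else st.1), (if v > st.2.1 then v else st.2.1), st.2.2 + v))]
  have hfirst : PySem.List.pyGetD (h :: t) 0 0 = h := by
    simp [PySem.List.pyGetD, PySem.List.pyGet?, PySem.List.pyIdx?]
  rw [hfirst, pv_foldl_triple]
  have hfmin : List.foldl min h (h :: t) = List.foldl min h t := by
    simp [List.foldl]
  have hfmax : List.foldl max h (h :: t) = List.foldl max h t := by
    simp [List.foldl]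
  rw [hfmin, hfmax]
  -- B side pieces
  have hperm : s.Perm (h :: t) := PySem.List.sorted_perm _ _ _
  have hmem_s : ∀ y, y ∈ s ↔ y ∈ h :: t := fun y => hperm.mem_iff
  -- min component
  have hmin : t.foldl min h = (PySem.List.pyGet? s 0).getD 0 := by
    have hm : (PySem.List.pyGet? s 0).getD 0 = m := by
      rw [hcons, PySem.List.pyGet?_zero_cons]; rfl
    rw [hm]
    have ha : PySem.List.min? (h :: t) (fun y => y) = some (t.foldl min h) :=
      PySem.List.min?_id_cons h t
    have hamem : t.foldl min h ∈ h :: t := PySem.List.min?_mem ha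
    have hamin : ∀ y ∈ h :: t, t.foldl min h ≤ y := PySem.List.min?_isMin ha
    have hmle : ∀ y ∈ h :: t, m ≤ y := PySem.List.key_head_sorted_le (h :: t) (fun x => x) (hs.symm.trans hcons)
    have hmmem : m ∈ h :: t := (hmem_s m).mp (hcons ▸ List.mem_cons_self ..)
    exact le_antisymm (hamin m hmmem) (hmle _ hamem)
  -- max component
  have hmax : t.foldl max h = (PySem.List.pyGet? s (-1)).getD 0 := by
    have hg : PySem.List.pyGet? s (-1) = some (s.getLast hsne) := by
      rw [PySem.List.pyGet?_neg_one, List.getLast?_eq_some_getLast]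
    rw [hg, Option.getD_some]
    have ha : PySem.List.max? (h :: t) (fun y => y) = some (t.foldl max h) :=
      PySem.List.max?_id_cons h t
    have hamem : t.foldl max h ∈ h :: t := PySem.List.max?_mem ha
    have hamax : ∀ y ∈ h :: t, y ≤ t.foldl max h := PySem.List.max?_isMax ha
    have hlmem : s.getLast hsne ∈ h :: t := (hmem_s _).mp (List.getLast_mem hsne)
    have hble : t.foldl max h ≤ s.getLast hsne := by
      have := pv_le_getLast (h :: t) (t.foldl max h)
      rw [← hs] at this
      exact this ((hmem_s _).mpr hamem) hsne
    exact le_antisymm hble (hamax _ hlmem)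
  -- sum component
  have hsum : (0 : Int) + (h :: t).sum = s.sum := by
    rw [hperm.sum_eq]; ring
  rw [hmin, hmax, hsum]

theorem weeklyStats_spec : Claim_equal_weeklyStats := by
  intro array _ pre
  unfold Spec_weeklyStats weeklyStats weeklyStats_alt
  rw [PySem.List.foldl_pyRange_zero_pyGetD' array []
        (fun (acc : List (Int × Int × Int)) row => acc ++ [pvRowA row]) []]
  rw [pv_foldl_append_map]
  simp only [List.nil_append]
  apply List.map_congr_left
  intro row hrow
  obtain ⟨h, t, rfl⟩ := List.exists_cons_of_ne_nil (pre row hrow)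
  exact pv_row_eq h t
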